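-- pv_equiv track=rewrite | github.com/cryptoam322/RHDT-cipher | RDHT-cipher_final.py | preprocess_backward
-- ===== SOURCE A (Python) =====
-- def preprocess_backward(preprocessed_plaintext):
--     # Convert the preprocessed plaintext into a stream of 0-25
--     number_stream=[]
--     for char in preprocessed_plaintext:
--         num=ord(char)-ord("A")
--         number_stream.append(num)
--     # Convert the stream of numbers into a stream of tuples (a,b)
--     tuple_stream=[]
--     for i in range(0, len(number_stream), 2):
--         tuple_stream.append((number_stream[i],number_stream[i+1]))
--     # Now we process each tuple to recover the plaintext number
--     plaintext_stream=[]
--     for tup in tuple_stream: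
--         a=tup[0]
--         b=tup[1]
--         c=a-b
--         if c<0:
--             plaintext_num=c+26
--         else:
--             plaintext_num=c
--         plaintext_stream.append(plaintext_num)
--     # Finally recover the plaintext from the stream of 0-25
--     plaintext=""
--     for num in plaintext_stream:
--         char=chr(num+ord("A"))
--         plaintext=plaintext+char
--     return(plaintext)
-- ===== SOURCE B (Python) =====
-- def preprocess_backward(preprocessed_plaintext):
--     # single pass over the text two characters at a time; no intermediate
--     # number/tuple/plaintext streams, output built with a join
--     out = []
--     i = 0
--     n = len(preprocessed_plaintext)
--     while i < n:
--         c = ord(preprocessed_plaintext[i]) - ord(preprocessed_plaintext[i + 1])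
--         out.append(chr((c + 26 if c < 0 else c) + 65))
--         i += 2
--     return "".join(out)
-- ===== Notes on version B (the rewrite author's own statement) =====
-- stated objective: simpler
-- what changed: B replaces A's four staged passes (number stream, tuple stream, plaintext-number stream, string concatenation) with one loop that reads each character pair, does the mod-26 subtraction inline, and joins the result characters.
import Mathlib
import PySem

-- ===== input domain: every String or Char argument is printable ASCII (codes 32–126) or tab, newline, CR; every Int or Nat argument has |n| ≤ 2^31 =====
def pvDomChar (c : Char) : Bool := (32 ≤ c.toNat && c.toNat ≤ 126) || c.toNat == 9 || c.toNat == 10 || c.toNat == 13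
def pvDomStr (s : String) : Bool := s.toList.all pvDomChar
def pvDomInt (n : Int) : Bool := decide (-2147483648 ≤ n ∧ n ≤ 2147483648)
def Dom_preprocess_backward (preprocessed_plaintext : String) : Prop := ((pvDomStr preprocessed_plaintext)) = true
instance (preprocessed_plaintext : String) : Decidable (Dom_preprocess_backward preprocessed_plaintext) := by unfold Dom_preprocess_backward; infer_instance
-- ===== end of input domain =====

-- B fuses A's four staged passes into one loop over character pairs; same values everywhere both return.

-- ===== PORT A =====
-- strings are handled as List Char; the growing result string is the growing List Char
def preprocess_backward (preprocessed_plaintext : String) : String :=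
  let chars := preprocessed_plaintext.toList
  -- number_stream
  let number_stream : List Int :=
    chars.foldl (fun acc ch => acc ++ [(ch.toNat : Int) - 65]) []
  -- tuple_stream: for i in range(0, len(number_stream), 2)
  let tuple_stream : List (Int × Int) :=
    (PySem.List.pyRange 0 (number_stream.length : Int) 2).foldl
      (fun acc i =>
        acc ++ [(PySem.List.pyGetD number_stream i 0,
                 PySem.List.pyGetD number_stream (i + 1) 0)]) []
  -- plaintext_stream
  let plaintext_stream : List Int :=
    tuple_stream.foldl (fun acc tup =>
      let a := tup.1
      let b := tup.2
      let c := a - b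
      let plaintext_num := if c < 0 then c + 26 else c
      acc ++ [plaintext_num]) []
  -- plaintext
  let plaintext : List Char :=
    plaintext_stream.foldl (fun acc num => acc ++ [Char.ofNat (num + 65).toNat]) []
  String.mk plaintext

-- ===== PORT B =====
-- B's while-loop consuming two characters per step, as the two-at-a-time structural recursion
def pvGoB : List Char → List Char
  | a :: b :: rest =>
      let c : Int := (a.toNat : Int) - (b.toNat : Int)
      Char.ofNat ((if c < 0 then c + 26 else c) + 65).toNat :: pvGoB rest
  | _ => []

def preprocess_backward_alt (preprocessed_plaintext : String) : String :=
  String.mk (pvGoB preprocessed_plaintext.toList)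

-- ===== PRECONDITION & SPEC =====
-- Pre_ excludes exactly the inputs where the Python A raises: odd length (IndexError on
-- number_stream[i+1]) and pairs whose adjusted difference makes chr's argument negative (ValueError).
def Pre_preprocess_backward (preprocessed_plaintext : String) : Prop :=
  preprocessed_plaintext.toList.length % 2 = 0 ∧
  ∀ i < preprocessed_plaintext.toList.length / 2,
    (preprocessed_plaintext.toList.getD (2 * i + 1) 'A').toNat ≤
      (preprocessed_plaintext.toList.getD (2 * i) 'A').toNat + 91
instance (preprocessed_plaintext : String) : Decidable (Pre_preprocess_backward preprocessed_plaintext) := by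
  unfold Pre_preprocess_backward; infer_instance

def pvWitness_preprocess_backward : String := "DCBA"

def Spec_preprocess_backward (preprocessed_plaintext : String) (out : String) : Prop := out = preprocess_backward_alt preprocessed_plaintext
instance (preprocessed_plaintext : String) (out : String) : Decidable (Spec_preprocess_backward preprocessed_plaintext out) := by unfold Spec_preprocess_backward; infer_instance

-- ===== CLAIM (what is proved, stated in full; the proofs are below) =====
def Claim_equal_preprocess_backward : Prop := ∀ (preprocessed_plaintext : String), Dom_preprocess_backward preprocessed_plaintext → Pre_preprocess_backward preprocessed_plaintext → Spec_preprocess_backward preprocessed_plaintext (preprocess_backward preprocessed_plaintext)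

-- ===== LEMMAS AND PROOFS =====

-- the per-pair character, indexed form (matches A's composite after simplification)
def pvCharAt (l : List Char) (k : Nat) : Char :=
  let a : Int := ((l.getD (2 * k) 'A').toNat : Int)
  let b : Int := ((l.getD (2 * k + 1) 'A').toNat : Int)
  let c := a - b
  Char.ofNat ((if c < 0 then c + 26 else c) + 65).toNat

theorem pvKey (l : List Char) (h : l.length % 2 = 0) :
    (List.range (l.length / 2)).map (pvCharAt l) = pvGoB l := by
  match l with
  | [] => simp [pvGoB]
  | [a] => simp at h
  | a :: b :: t =>
      have ht : t.length % 2 = 0 := by simp [List.length_cons] at h; omega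
      have hlen : (a :: b :: t).length / 2 = t.length / 2 + 1 := by
        simp [List.length_cons]; omega
      rw [hlen, List.range_succ_eq_map, List.map_cons, List.map_map]
      rw [show pvGoB (a :: b :: t) = Char.ofNat
            ((if ((a.toNat : Int) - (b.toNat : Int)) < 0 then ((a.toNat : Int) - (b.toNat : Int)) + 26
              else ((a.toNat : Int) - (b.toNat : Int))) + 65).toNat :: pvGoB t from rfl]
      congr 1
      · rw [← pvKey t ht]
        apply List.map_congr_left
        intro k _
        simp [pvCharAt, Function.comp, Nat.mul_succ]

theorem pvA_eq (s : String) (h : s.toList.length % 2 = 0) :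
    preprocess_backward s =
      String.mk ((List.range (s.toList.length / 2)).map (pvCharAt s.toList)) := by
  unfold preprocess_backward
  simp only [PySem.List.foldl_append_singleton_eq_map, List.nil_append, List.map_map,
    List.length_map]
  have hm : (s.toList.length : Int) = 2 * (s.toList.length / 2 : Nat) := by omega
  rw [hm, PySem.List.pyRange_of_pos 0 (2 * (s.toList.length / 2 : Nat)) (by omega)]
  have hif : (if (0:Int) < 2 * (s.toList.length / 2 : Nat) then
      ((2 * ((s.toList.length / 2 : Nat) : Int) - 0 + 2 - 1) / 2).toNat else 0)
      = s.toList.length / 2 := by split <;> omega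
  rw [hif, List.map_map]
  congr 1
  apply List.map_congr_left
  intro k hk
  rw [List.mem_range] at hk
  have h2k : 2 * k < s.toList.length := by omega
  have h2k1 : 2 * k + 1 < s.toList.length := by omega
  have e1 : (0:Int) + 2 * (k : Int) = ((2 * k : Nat) : Int) := by push_cast; ring
  have e2 : ((2 * k : Nat) : Int) + 1 = ((2 * k + 1 : Nat) : Int) := by push_cast; ring
  simp only [Function.comp, e1, e2, PySem.List.pyGetD_natCast, pvCharAt,
    List.getD_eq_getElem?_getD, List.getElem?_map,
    List.getElem?_eq_getElem h2k, List.getElem?_eq_getElem h2k1, Option.map_some,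
    Option.getD_some]
  have harith : ((s.toList[2*k].toNat : Int) - 65) - ((s.toList[2*k+1].toNat : Int) - 65)
      = (s.toList[2*k].toNat : Int) - (s.toList[2*k+1].toNat : Int) := by ring
  rw [harith]

-- ===== VERDICT (by name: the statement is the Claim_ definition above) =====
theorem preprocess_backward_spec : Claim_equal_preprocess_backward := by
  intro s _ hpre
  unfold Spec_preprocess_backward preprocess_backward_alt
  rw [pvA_eq s hpre.1, pvKey s.toList hpre.1]
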